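-- pv_equiv track=rewrite | github.com/glp500/Gauntlet | src/gauntlet/orchestrator/pipeline.py | _group_violations_by_file
-- ===== SOURCE A (Python) =====
-- def _group_violations_by_file(
--     violations: list[dict[str, str]],
-- ) -> dict[str, list[str]]:
--     """Group validation findings by file for targeted repair prompts."""
--     grouped: dict[str, list[str]] = {}
--     for violation in violations:
--         file_name = violation["file"]
--         grouped.setdefault(file_name, []).append(violation["message"])
--     return grouped
-- ===== SOURCE B (Python) =====
-- def _group_violations_by_file(
--     violations: list[dict[str, str]],
-- ) -> dict[str, list[str]]:
--     """Group validation findings by file for targeted repair prompts."""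
--     pairs = [(v["file"], v["message"]) for v in violations]
--     files = dict.fromkeys(f for f, _ in pairs)
--     return {f: [m for g, m in pairs if g == f] for f in files}
-- ===== Notes on version B (the rewrite author's own statement) =====
-- stated objective: alternative
-- what changed: Replaces the one-pass dict.setdefault accumulation with a two-phase scheme: extract (file, message) pairs, dedup the file names in first-occurrence order, then build each group by a filter over the pairs.
import Mathlib
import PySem

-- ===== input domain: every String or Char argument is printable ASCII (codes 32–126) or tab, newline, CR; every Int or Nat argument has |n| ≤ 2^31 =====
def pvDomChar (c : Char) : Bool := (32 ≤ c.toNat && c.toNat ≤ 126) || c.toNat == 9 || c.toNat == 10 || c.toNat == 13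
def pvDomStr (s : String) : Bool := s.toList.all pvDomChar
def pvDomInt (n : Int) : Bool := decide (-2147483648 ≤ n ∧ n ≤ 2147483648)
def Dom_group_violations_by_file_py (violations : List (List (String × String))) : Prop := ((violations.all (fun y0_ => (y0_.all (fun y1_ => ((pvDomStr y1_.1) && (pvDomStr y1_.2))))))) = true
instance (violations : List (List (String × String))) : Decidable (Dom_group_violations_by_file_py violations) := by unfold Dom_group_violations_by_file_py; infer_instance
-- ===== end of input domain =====

-- B replaces A's one-pass setdefault accumulation by a two-phase scheme (extract pairs, dedup
-- file names in first-occurrence order, filter per file); not faster, a structural alternative.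

-- ===== PORT A =====
-- A: grouped = {}; for violation: grouped.setdefault(violation["file"], []).append(violation["message"]).
-- The dict lookups violation["file"] / violation["message"] are total here via getD; Pre_ below
-- admits exactly the inputs where both keys are present (elsewhere Python raises KeyError).
-- setdefault-then-append is ported as Dict.modify with default [].
def group_violations_by_file_py (violations : List (List (String × String))) : List (String × List String) :=
  (violations.foldl
    (fun grouped violation =>
      grouped.modify ((PySem.Dict.mk violation).getD "file" "") []
        (fun msgs => msgs ++ [(PySem.Dict.mk violation).getD "message" ""]))
    PySem.Dict.empty).items

-- ===== PORT B =====
-- B: pairs = [(v["file"], v["message"]) …]; files = dict.fromkeys(first components); then one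
-- filtered pass over pairs per file.  dict.fromkeys is PySem.List.dedup.
def group_violations_by_file_py_alt (violations : List (List (String × String))) : List (String × List String) :=
  let pairs := violations.map
    (fun v => ((PySem.Dict.mk v).getD "file" "", (PySem.Dict.mk v).getD "message" ""))
  (PySem.List.dedup (pairs.map (fun p => p.1))).map
    (fun f => (f, (pairs.filter (fun p => p.1 == f)).map (fun p => p.2)))

-- ===== PRECONDITION & SPEC =====
-- Pre_ excludes exactly the inputs on which Python A raises KeyError: some violation dict
-- lacking the key "file" or the key "message".
def Pre_group_violations_by_file_py (violations : List (List (String × String))) : Prop :=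
  ∀ v ∈ violations, "file" ∈ v.map Prod.fst ∧ "message" ∈ v.map Prod.fst
instance (violations : List (List (String × String))) : Decidable (Pre_group_violations_by_file_py violations) := by unfold Pre_group_violations_by_file_py; infer_instance

def pvWitness_group_violations_by_file_py : (List (List (String × String))) :=
  [[("file", "a.py"), ("message", "bad name")], [("file", "a.py"), ("message", "too long")], [("file", "b.py"), ("message", "unused")]]

def Spec_group_violations_by_file_py (violations : List (List (String × String))) (out : List (String × List String)) : Prop := out = group_violations_by_file_py_alt violations
instance (violations : List (List (String × String))) (out : List (String × List String)) : Decidable (Spec_group_violations_by_file_py violations out) := by unfold Spec_group_violations_by_file_py; infer_instance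

-- ===== CLAIM (what is proved, stated in full; the proofs are below) =====
def Claim_equal_group_violations_by_file_py : Prop := ∀ (violations : List (List (String × String))), Dom_group_violations_by_file_py violations → Pre_group_violations_by_file_py violations → Spec_group_violations_by_file_py violations (group_violations_by_file_py violations)

-- ===== LEMMAS AND PROOFS =====

-- The grouping fold over (file, message) pairs, rendered as B renders it: one entry per
-- first-occurrence-distinct file, carrying the messages of that file in order.
theorem grouped_items_eq (pairs : List (String × String)) :
    (pairs.foldl (fun d p => d.modify p.1 [] (fun msgs => msgs ++ [p.2])) PySem.Dict.empty).items
      = (PySem.List.dedup (pairs.map (fun p => p.1))).map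
          (fun f => (f, (pairs.filter (fun p => p.1 == f)).map (fun p => p.2))) := by
  have hnd : (pairs.foldl (fun d p => d.modify p.1 [] (fun msgs => msgs ++ [p.2])) PySem.Dict.empty).keys.Nodup :=
    PySem.Dict.nodup_keys_foldl_modify_key pairs Prod.fst [] (fun _ p msgs => msgs ++ [p.2])
      PySem.Dict.empty (by simp [pysem])
  rw [PySem.Dict.items_eq_map_keys _ hnd []]
  have hkeys : (pairs.foldl (fun d p => d.modify p.1 [] (fun msgs => msgs ++ [p.2])) PySem.Dict.empty).keys
      = PySem.List.dedup (pairs.map (fun p => p.1)) := by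
    rw [PySem.Dict.keys_foldl_modify_key pairs Prod.fst [] (fun _ p msgs => msgs ++ [p.2])]
    simp [pysem, PySem.Set.ofList_eq_foldl, PySem.Set.update]
  rw [hkeys]
  refine List.map_congr_left (fun f _ => ?_)
  rw [PySem.Dict.getD_foldl_modify_append]
  simp [pysem]

-- ===== VERDICT (by name: the statement is the Claim_ definition above) =====
theorem group_violations_by_file_py_spec : Claim_equal_group_violations_by_file_py := by
  intro violations _ _
  unfold Spec_group_violations_by_file_py group_violations_by_file_py group_violations_by_file_py_alt
  have hmap : (violations.foldl
      (fun grouped violation =>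
        grouped.modify ((PySem.Dict.mk violation).getD "file" "") []
          (fun msgs => msgs ++ [(PySem.Dict.mk violation).getD "message" ""]))
      PySem.Dict.empty)
      = ((violations.map
          (fun v => ((PySem.Dict.mk v).getD "file" "", (PySem.Dict.mk v).getD "message" ""))).foldl
          (fun d p => d.modify p.1 [] (fun msgs => msgs ++ [p.2])) PySem.Dict.empty) := by
    rw [List.foldl_map]
  rw [hmap, grouped_items_eq]
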